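-- pv_equiv track=rewrite | github.com/hasenoz/EightQueensProblemHillClimbing | main.py | sorted_index_list
-- ===== SOURCE A (Python) =====
-- def sorted_index_list(list_of_values):
--     sorted_values = []
--     sorted_index = []
--     for i in range(len(list_of_values)):
--         sorted_values.append([i, list_of_values[i]])
--     sorted_values = sorted(sorted_values, key=lambda l: l[1], reverse=True)
--     for i in range(len(sorted_values)):
--         sorted_index.append(sorted_values[i][0])
--     return sorted_index
-- ===== SOURCE B (Python) =====
-- def sorted_index_list(list_of_values):
--     # Bucket indices by value, then emit the buckets in descending value order.
--     groups = {}
--     for i, v in enumerate(list_of_values):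
--         groups.setdefault(v, []).append(i)
--     result = []
--     for v in sorted(groups, reverse=True):
--         result.extend(groups[v])
--     return result
-- ===== Notes on version B (the rewrite author's own statement) =====
-- stated objective: alternative
-- what changed: Replaces the build-[index,value]-pairs / stable-sort / extract-first-components pipeline by a dict that buckets indices under their value in one pass, then concatenates the buckets in descending order of the distinct values.
import Mathlib
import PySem

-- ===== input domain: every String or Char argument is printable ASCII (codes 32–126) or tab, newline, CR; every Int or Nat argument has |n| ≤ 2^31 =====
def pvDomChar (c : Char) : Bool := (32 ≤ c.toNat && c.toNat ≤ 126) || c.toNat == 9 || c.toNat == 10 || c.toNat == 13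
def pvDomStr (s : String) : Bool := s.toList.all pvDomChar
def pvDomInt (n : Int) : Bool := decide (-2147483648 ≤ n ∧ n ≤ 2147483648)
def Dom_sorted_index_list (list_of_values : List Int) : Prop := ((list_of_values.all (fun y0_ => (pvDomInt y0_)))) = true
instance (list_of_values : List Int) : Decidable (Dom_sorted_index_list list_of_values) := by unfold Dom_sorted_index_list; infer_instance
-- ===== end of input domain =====

-- B replaces A's pair-building + stable sort + extraction by a dict bucketing indices per value,
-- emitted in descending order of the distinct values (objective: alternative algorithm).

-- ===== PORT A =====
-- 'list_of_values[i]' with i from range(len(..)) is always in range, so pyGetD's default is never used.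
def sorted_index_list (list_of_values : List Int) : List Int :=
  let sorted_values : List (Int × Int) :=
    (PySem.List.pyRange 0 (PySem.List.len list_of_values)).foldl
      (fun acc i => acc ++ [(i, PySem.List.pyGetD list_of_values i 0)]) []
  let sorted_values := PySem.List.sorted sorted_values (fun l => l.2) true
  (PySem.List.pyRange 0 (PySem.List.len sorted_values)).foldl
    (fun acc i => acc ++ [(PySem.List.pyGetD sorted_values i (0, 0)).1]) []

-- ===== PORT B =====
def sorted_index_list_alt (list_of_values : List Int) : List Int :=
  let groups : PySem.Dict Int (List Int) :=
    (PySem.List.enumerate list_of_values).foldl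
      (fun d iv => d.modify iv.2 [] (fun l => l ++ [iv.1])) PySem.Dict.empty
  (PySem.List.sorted groups.keys (fun v => v) true).foldl
    (fun acc v => acc ++ groups.getD v []) []

-- ===== PRECONDITION & SPEC =====
def Spec_sorted_index_list (list_of_values : List Int) (out : List Int) : Prop := out = sorted_index_list_alt list_of_values
instance (list_of_values : List Int) (out : List Int) : Decidable (Spec_sorted_index_list list_of_values out) := by unfold Spec_sorted_index_list; infer_instance

-- ===== CLAIM (what is proved, stated in full; the proofs are below) =====
def Claim_equal_sorted_index_list : Prop := ∀ (list_of_values : List Int), Dom_sorted_index_list list_of_values → Spec_sorted_index_list list_of_values (sorted_index_list list_of_values)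

-- ===== LEMMAS AND PROOFS =====

-- insertBy walks past a prefix it never inserts before
theorem insertBy_append_of_forall_not {α : Type} (before : α → α → Bool) (x : α)
    (l₁ l₂ : List α) (h : ∀ a ∈ l₁, before x a = false) :
    PySem.List.insertBy before x (l₁ ++ l₂) = l₁ ++ PySem.List.insertBy before x l₂ := by
  induction l₁ with
  | nil => simp
  | cons a t ih =>
      simp only [List.cons_append, PySem.List.insertBy, h a (by simp)]
      simp [ih (fun b hb => h b (by simp [hb]))]

theorem insertBy_cons_of_before {α : Type} (before : α → α → Bool) (x a : α) (l : List α)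
    (h : before x a = true) :
    PySem.List.insertBy before x (a :: l) = x :: a :: l := by
  simp [PySem.List.insertBy, h]

-- buckets for values absent from the new element's key are unchanged
theorem flatMap_groups_of_not_mem {α : Type} (y : α) (key : α → Int)
    (f : Int → List α) (vs : List Int) (h : key y ∉ vs) :
    (vs.flatMap (fun v => f v ++ if key y == v then [y] else [])) = vs.flatMap f := by
  induction vs with
  | nil => simp
  | cons v t ih =>
      have hv : key y ≠ v := fun hc => h (by simp [hc])
      have ih' := ih (fun hc => h (by simp [hc]))
      simp only [beq_iff_eq] at ih'
      simp [hv, ih']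

-- inserting y into descending-value buckets appends it to the bucket of its key
theorem insertBy_groups {α : Type} (key : α → Int) (l : List α) (y : α) (vals : List Int)
    (hp : vals.Pairwise (fun a b => b < a)) (hy : key y ∈ vals) :
    PySem.List.insertBy (fun a b => decide (key b < key a)) y
        (vals.flatMap (fun v => l.filter (fun a => key a == v)))
      = vals.flatMap (fun v => l.filter (fun a => key a == v) ++ if key y == v then [y] else []) := by
  induction vals with
  | nil => simp at hy
  | cons v vs ih =>
      have hgt : ∀ v' ∈ vs, v' < v := fun v' hv' => (List.pairwise_cons.mp hp).1 v' hv'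
      by_cases hv : key y = v
      · have h1 : ∀ a ∈ l.filter (fun a => key a == v), (decide (key a < key y)) = false := by
          intro a ha
          have := (List.mem_filter.mp ha).2
          simp only [beq_iff_eq] at this
          simp [this, hv]
        have hnotmem : key y ∉ vs := fun hc => absurd (hgt _ hc) (by simp [hv])
        have h2 : ∀ a ∈ vs.flatMap (fun v => l.filter (fun a => key a == v)),
            (decide (key a < key y)) = true := by
          intro a ha
          obtain ⟨v', hv', ha'⟩ := List.mem_flatMap.mp ha
          have := (List.mem_filter.mp ha').2
          simp only [beq_iff_eq] at this
          have := hgt v' hv'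
          simp; omega
        rw [List.flatMap_cons, insertBy_append_of_forall_not _ _ _ _ h1]
        have htail : PySem.List.insertBy (fun a b => decide (key b < key a)) y
            (vs.flatMap (fun v => l.filter (fun a => key a == v)))
            = y :: vs.flatMap (fun v => l.filter (fun a => key a == v)) := by
          cases heq : vs.flatMap (fun v => l.filter (fun a => key a == v)) with
          | nil => simp [PySem.List.insertBy]
          | cons b t =>
              exact insertBy_cons_of_before _ _ _ _ (h2 b (by rw [heq]; simp))
        rw [htail, List.flatMap_cons, flatMap_groups_of_not_mem y key _ vs hnotmem]
        simp [hv]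
      · have hyvs : key y ∈ vs := by
          rcases List.mem_cons.mp hy with h | h
          · exact absurd h hv
          · exact h
        have h1 : ∀ a ∈ l.filter (fun a => key a == v), (decide (key a < key y)) = false := by
          intro a ha
          have := (List.mem_filter.mp ha).2
          simp only [beq_iff_eq] at this
          have := hgt _ hyvs
          simp; omega
        rw [List.flatMap_cons, insertBy_append_of_forall_not _ _ _ _ h1,
            ih (List.pairwise_cons.mp hp).2 hyvs, List.flatMap_cons]
        have hv' : (key y == v) = false := by simp [hv]
        simp [hv']

-- a stable reverse sort is the concatenation of the value buckets in descending value order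
theorem sorted_rev_eq_flatMap_groups {α : Type} (key : α → Int) (l : List α) (vals : List Int)
    (hp : vals.Pairwise (fun a b => b < a)) (hmem : ∀ a ∈ l, key a ∈ vals) :
    PySem.List.sorted l key true = vals.flatMap (fun v => l.filter (fun a => key a == v)) := by
  induction l using List.reverseRecOn with
  | nil => simp [PySem.List.sorted_rev_eq_foldl_insertBy]
  | append_singleton t y ih =>
      have hstep : PySem.List.sorted (t ++ [y]) key true
          = PySem.List.insertBy (fun a b => decide (key b < key a)) y
              (PySem.List.sorted t key true) := by
        rw [PySem.List.sorted_rev_eq_foldl_insertBy, List.foldl_append,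
            ← PySem.List.sorted_rev_eq_foldl_insertBy]
        rfl
      rw [hstep, ih (fun a ha => hmem a (by simp [ha])),
          insertBy_groups key t y vals hp (hmem y (by simp))]
      apply List.flatMap_congr
      intro v _
      rw [List.filter_append]
      by_cases h : key y = v <;> simp [h]

-- the bucket dict's lookup: indices carrying value v, in order
theorem groups_getD (xs : List Int) (v : Int) :
    ((PySem.List.enumerate xs).foldl
        (fun d iv => d.modify iv.2 [] (fun l => l ++ [iv.1]))
        (PySem.Dict.empty : PySem.Dict Int (List Int))).getD v []
      = ((PySem.List.enumerate xs).filter (fun p => p.2 == v)).map (fun p => p.1) := by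
  have hswap : (PySem.List.enumerate xs).foldl
      (fun d iv => d.modify iv.2 [] (fun l => l ++ [iv.1]))
      (PySem.Dict.empty : PySem.Dict Int (List Int))
      = ((PySem.List.enumerate xs).map (fun iv => (iv.2, iv.1))).foldl
          (fun d p => d.modify p.1 [] (fun l => l ++ [p.2])) PySem.Dict.empty := by
    rw [List.foldl_map]
  rw [hswap, PySem.Dict.getD_foldl_modify_append, PySem.Dict.getD_empty, List.nil_append,
      List.filter_map, List.map_map]
  rfl

-- the bucket dict's keys: the distinct values, in first-occurrence order
theorem groups_keys (xs : List Int) :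
    ((PySem.List.enumerate xs).foldl
        (fun d iv => d.modify iv.2 [] (fun l => l ++ [iv.1]))
        (PySem.Dict.empty : PySem.Dict Int (List Int))).keys
      = PySem.Set.ofList xs := by
  rw [PySem.Dict.keys_foldl_modify_key (PySem.List.enumerate xs) (fun iv => iv.2) []
      (fun _ iv => fun l => l ++ [iv.1]) PySem.Dict.empty]
  simp [PySem.Set.update_nil_left, PySem.List.map_snd_enumerate]

-- ===== VERDICT (by name: the statement is the Claim_ definition above) =====
theorem sorted_index_list_spec : Claim_equal_sorted_index_list := by
  intro xs _
  unfold Spec_sorted_index_list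
  -- A's result: first components of the stable reverse sort of enumerate(xs)
  have hA : sorted_index_list xs
      = (PySem.List.sorted (PySem.List.enumerate xs) (fun l => l.2) true).map (fun p => p.1) := by
    unfold sorted_index_list
    simp only [PySem.List.foldl_append_singleton_eq_map, List.nil_append,
      ← PySem.List.enumerate_eq_map_pyRange xs 0]
    conv_rhs => rw [← PySem.List.map_pyGetD_pyRange_zero
      (PySem.List.sorted (PySem.List.enumerate xs) (fun l => l.2) true) ((0 : Int), (0 : Int))]
    rw [List.map_map]
    rfl
  -- B's result: the buckets in descending value order
  have hB : sorted_index_list_alt xs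
      = (PySem.List.sorted (PySem.Set.ofList xs) (fun v => v) true).flatMap
          (fun v => ((PySem.List.enumerate xs).filter (fun p => p.2 == v)).map (fun p => p.1)) := by
    unfold sorted_index_list_alt
    simp only [PySem.List.foldl_append_eq_flatMap, List.nil_append, groups_keys]
    apply List.flatMap_congr
    intro v _
    exact groups_getD xs v
  -- the descending distinct values, strictly decreasing, covering every value
  have hnd : (PySem.List.sorted (PySem.Set.ofList xs) (fun v => v) true).Nodup :=
    ((PySem.List.sorted_perm (PySem.Set.ofList xs) (fun v => v) true).nodup_iff).mpr
      (PySem.Set.nodup_ofList xs)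
  have hp : (PySem.List.sorted (PySem.Set.ofList xs) (fun v => v) true).Pairwise
      (fun a b => b < a) := by
    have hle := PySem.List.sorted_pairwise_rev (PySem.Set.ofList xs) (fun v => v)
    exact (hle.and hnd).imp (fun h => lt_of_le_of_ne h.1 (Ne.symm h.2))
  have hmem : ∀ p ∈ PySem.List.enumerate xs,
      (fun l : Int × Int => l.2) p ∈ PySem.List.sorted (PySem.Set.ofList xs) (fun v => v) true := by
    intro p hpmem
    rw [PySem.List.mem_sorted, PySem.Set.mem_ofList]
    obtain ⟨k, hk, rfl⟩ := (PySem.List.mem_enumerate_iff xs 0 p).mp hpmem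
    exact List.getElem_mem hk
  rw [hA, hB, sorted_rev_eq_flatMap_groups (fun l : Int × Int => l.2) (PySem.List.enumerate xs)
      (PySem.List.sorted (PySem.Set.ofList xs) (fun v => v) true) hp hmem, List.map_flatMap]
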